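-- pv_equiv track=rewrite | github.com/ebleb/JosephsonCircuitsGui | logic/validator.py | has_path_to_p_block
-- ===== SOURCE A (Python) =====
-- def is_pin_block(inst):
--     return inst.get("type_name", "").lower() == "p"
--
-- def has_path_to_p_block(start_uid, instances_dict, adj_graph):
--     queue = [start_uid]
--     visited = {start_uid}
--
--     while queue:
--         curr_uid = queue.pop(0)
--         curr_inst = instances_dict.get(curr_uid)
--
--         if curr_inst and is_pin_block(curr_inst):
--             return True
--
--         for neighbor in adj_graph.get(curr_uid, []):
--             if neighbor not in visited:
--                 visited.add(neighbor)
--                 queue.append(neighbor)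
--
--     return False
-- ===== SOURCE B (Python) =====
-- def has_path_to_p_block(start_uid, instances_dict, adj_graph):
--     # Level-synchronous frontier expansion over sets (no worklist queue):
--     # expand the whole frontier at once and test each level for a pin block.
--     def is_pin(uid):
--         inst = instances_dict.get(uid)
--         return bool(inst) and inst.get("type_name", "").lower() == "p"
--
--     reachable = {start_uid}
--     frontier = {start_uid}
--     while frontier:
--         if any(is_pin(u) for u in frontier):
--             return True
--         frontier = {n for u in frontier for n in adj_graph.get(u, [])} - reachable
--         reachable |= frontier
--     return False
-- ===== Notes on version B (the rewrite author's own statement) =====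
-- stated objective: alternative
-- what changed: A's one-node-at-a-time BFS worklist (queue.pop(0) with per-neighbor visited bookkeeping) is replaced by level-synchronous frontier expansion over sets: each round tests the whole frontier for a pin block, then computes the next frontier as the set-difference of all neighbors against the reachable set.
import Mathlib
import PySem

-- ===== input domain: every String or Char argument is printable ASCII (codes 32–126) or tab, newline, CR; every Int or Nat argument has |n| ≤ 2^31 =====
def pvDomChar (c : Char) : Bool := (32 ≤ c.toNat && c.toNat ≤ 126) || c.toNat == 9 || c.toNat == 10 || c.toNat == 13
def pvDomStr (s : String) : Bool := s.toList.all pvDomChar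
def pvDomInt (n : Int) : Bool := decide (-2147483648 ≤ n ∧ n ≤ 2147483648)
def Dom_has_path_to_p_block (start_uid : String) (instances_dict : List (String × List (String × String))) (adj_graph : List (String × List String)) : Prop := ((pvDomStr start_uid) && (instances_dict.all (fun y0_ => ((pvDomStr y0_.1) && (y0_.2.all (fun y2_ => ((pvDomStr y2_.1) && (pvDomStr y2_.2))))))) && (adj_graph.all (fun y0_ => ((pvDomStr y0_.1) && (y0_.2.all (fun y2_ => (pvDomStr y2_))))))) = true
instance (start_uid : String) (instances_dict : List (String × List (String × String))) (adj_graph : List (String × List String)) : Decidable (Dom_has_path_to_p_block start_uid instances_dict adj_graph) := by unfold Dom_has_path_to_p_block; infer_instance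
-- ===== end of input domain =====

-- B replaces A's one-node-at-a-time BFS worklist queue by level-synchronous whole-frontier
-- expansion over sets (objective: alternative decomposition; same reachability answer).

-- ===== PORT A =====
-- shared helper: adj_graph.get(u, [])  (both Pythons call this expression)
def pvNbrs (adj_graph : List (String × List String)) (u : String) : List String :=
  PySem.Dict.getD (PySem.Dict.mk adj_graph) u []

-- termination infrastructure (used only by the decreasing_by proofs of the two loops):
-- every node either loop ever inserts is a neighbour listed somewhere in adj_graph.
def pvU (adj_graph : List (String × List String)) : List String :=
  adj_graph.flatMap (fun p => p.2)

def pvMu (adj_graph : List (String × List String)) (v : List String) : Nat :=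
  ((pvU adj_graph).filter (fun x => !decide (x ∈ v))).length

lemma pvNbrs_subset_U (adj_graph : List (String × List String)) (u n : String)
    (h : n ∈ pvNbrs adj_graph u) : n ∈ pvU adj_graph := by
  induction adj_graph with
  | nil => simp [pvNbrs, PySem.Dict.getD, PySem.Dict.get?] at h
  | cons p rest ih =>
    obtain ⟨k, vs⟩ := p
    rw [pvNbrs, PySem.Dict.getD_eq_get?_getD, PySem.Dict.get?_mk_cons] at h
    by_cases hk : (k == u) = true
    · rw [if_pos hk] at h
      simp only [Option.getD_some] at h
      exact List.mem_flatMap.mpr ⟨(k, vs), by simp, h⟩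
    · rw [if_neg (by simpa using hk)] at h
      have h' : n ∈ pvNbrs rest u := by
        rw [pvNbrs, PySem.Dict.getD_eq_get?_getD]; exact h
      have := ih h'
      unfold pvU at this ⊢
      simp only [List.flatMap_cons, List.mem_append]
      exact Or.inr this

lemma pvMu_le (adj_graph : List (String × List String)) (v v' : List String)
    (h : ∀ x ∈ v, x ∈ v') : pvMu adj_graph v' ≤ pvMu adj_graph v := by
  unfold pvMu
  apply List.Sublist.length_le
  apply List.monotone_filter_right
  intro a ha
  simp at ha ⊢
  intro hav; exact ha (h a hav)

lemma pvMu_lt (adj_graph : List (String × List String)) (v v' : List String)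
    (h : ∀ x ∈ v, x ∈ v') (x : String) (hxU : x ∈ pvU adj_graph)
    (hxv : x ∉ v) (hxv' : x ∈ v') : pvMu adj_graph v' < pvMu adj_graph v := by
  have hsub : List.Sublist ((pvU adj_graph).filter (fun y => !decide (y ∈ v')))
      ((pvU adj_graph).filter (fun y => !decide (y ∈ v))) := by
    apply List.monotone_filter_right
    intro a ha
    simp at ha ⊢
    intro hav; exact ha (h a hav)
  refine Nat.lt_of_le_of_ne (List.Sublist.length_le hsub) ?_
  intro heq
  have heq' := hsub.eq_of_length heq
  have hxmem : x ∈ (pvU adj_graph).filter (fun y => !decide (y ∈ v)) := by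
    simp [hxU, hxv]
  rw [← heq'] at hxmem
  simp at hxmem
  exact hxmem.2 hxv'

-- A's helper is_pin_block(inst)
def is_pin_block (inst : List (String × String)) : Bool :=
  PySem.Str.lower (PySem.Dict.getD (PySem.Dict.mk inst) "type_name" "") == "p"

-- A's test 'curr_inst and is_pin_block(curr_inst)' (a falsy curr_inst — None or {} — fails it)
def pvCond (instances_dict : List (String × List (String × String))) (c : String) : Bool :=
  match PySem.Dict.get? (PySem.Dict.mk instances_dict) c with
  | some d => !d.isEmpty && is_pin_block d
  | none => false

-- A's inner 'for neighbor in adj_graph.get(curr_uid, [])' loop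
def pvEnqueue (ns queue : List String) (visited : PySem.Set String) :
    List String × PySem.Set String :=
  match ns with
  | [] => (queue, visited)
  | n :: rest =>
    if !(PySem.Set.contains visited n) then
      pvEnqueue rest (queue ++ [n]) (PySem.Set.add visited n)
    else
      pvEnqueue rest queue visited

lemma pvEnqueue_cons (n : String) (rest q : List String) (v : PySem.Set String) :
    pvEnqueue (n :: rest) q v =
      if n ∈ v then pvEnqueue rest q v
      else pvEnqueue rest (q ++ [n]) (PySem.Set.add v n) := by
  simp [pvEnqueue]

-- visited only grows under pvEnqueue, by elements of ns; if nothing is new, nothing changes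
lemma pvEnqueue_dec (adj_graph : List (String × List String)) :
    ∀ (ns q : List String) (v : PySem.Set String), (∀ n ∈ ns, n ∈ pvU adj_graph) →
    pvMu adj_graph (pvEnqueue ns q v).2 < pvMu adj_graph v ∨
      ((pvEnqueue ns q v).2 = v ∧ (pvEnqueue ns q v).1 = q) := by
  intro ns
  induction ns with
  | nil => intro q v _; right; simp [pvEnqueue]
  | cons n rest ih =>
    intro q v hU
    rw [pvEnqueue_cons]
    by_cases hc : n ∈ v
    · rw [if_pos hc]
      exact ih q v (fun m hm => hU m (by simp [hm]))
    · rw [if_neg hc]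
      left
      have hmono : ∀ x ∈ v, x ∈ PySem.Set.add v n :=
        fun x hx => (PySem.Set.mem_add _ _ _).mpr (Or.inl hx)
      have hlt : pvMu adj_graph (PySem.Set.add v n) < pvMu adj_graph v :=
        pvMu_lt adj_graph v (PySem.Set.add v n) hmono n
          (hU n (by simp)) hc ((PySem.Set.mem_add _ _ _).mpr (Or.inr rfl))
      rcases ih (q ++ [n]) (PySem.Set.add v n)
          (fun m hm => hU m (by simp [hm])) with hlt' | ⟨heq, _⟩
      · exact lt_trans hlt' hlt
      · rw [heq]; exact hlt

-- A's BFS worklist loop ('while queue')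
def pvBfs (instances_dict : List (String × List (String × String)))
    (adj_graph : List (String × List String))
    (queue : List String) (visited : PySem.Set String) : Bool :=
  match queue with
  | [] => false
  | c :: rest =>
    if pvCond instances_dict c then true
    else
      pvBfs instances_dict adj_graph
        (pvEnqueue (pvNbrs adj_graph c) rest visited).1
        (pvEnqueue (pvNbrs adj_graph c) rest visited).2
termination_by (pvMu adj_graph visited, queue.length)
decreasing_by
  rcases pvEnqueue_dec adj_graph (pvNbrs adj_graph c) rest visited
      (fun n hn => pvNbrs_subset_U adj_graph c n hn) with h | ⟨h1, h2⟩
  · exact Prod.Lex.left _ _ h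
  · rw [h1, h2]; exact Prod.Lex.right _ (by simp)

def has_path_to_p_block (start_uid : String) (instances_dict : List (String × List (String × String))) (adj_graph : List (String × List String)) : Bool :=
  pvBfs instances_dict adj_graph [start_uid] (PySem.Set.ofList [start_uid])

-- ===== PORT B =====
-- B's is_pin(uid) helper
def pvPinB (instances_dict : List (String × List (String × String))) (uid : String) : Bool :=
  match PySem.Dict.get? (PySem.Dict.mk instances_dict) uid with
  | some d => !d.isEmpty && (PySem.Str.lower (PySem.Dict.getD (PySem.Dict.mk d) "type_name" "") == "p")
  | none => false

-- B's 'while frontier' loop: test the whole frontier, then expand it in one step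
def pvLoopB (instances_dict : List (String × List (String × String)))
    (adj_graph : List (String × List String))
    (frontier reachable : PySem.Set String) : Bool :=
  if frontier.isEmpty then false
  else if frontier.any (pvPinB instances_dict) then true
  else
    pvLoopB instances_dict adj_graph
      (PySem.Set.diff (PySem.Set.ofList (frontier.flatMap (pvNbrs adj_graph))) reachable)
      (PySem.Set.union reachable
        (PySem.Set.diff (PySem.Set.ofList (frontier.flatMap (pvNbrs adj_graph))) reachable))
termination_by 2 * pvMu adj_graph reachable + (if frontier.isEmpty then 0 else 1)
decreasing_by
  simp only [List.flatMap_subtype, List.unattach_attach]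
  rename_i hne _
  have hmono : ∀ x ∈ reachable,
      x ∈ PySem.Set.union reachable
        (PySem.Set.diff (PySem.Set.ofList (frontier.flatMap (pvNbrs adj_graph))) reachable) :=
    fun x hx => (PySem.Set.mem_union _ _ _).mpr (Or.inl hx)
  by_cases hnf : (PySem.Set.diff (PySem.Set.ofList (frontier.flatMap (pvNbrs adj_graph))) reachable) = []
  · have hle : pvMu adj_graph
        (PySem.Set.union reachable
          (PySem.Set.diff (PySem.Set.ofList (frontier.flatMap (pvNbrs adj_graph))) reachable))
        ≤ pvMu adj_graph reachable := pvMu_le _ _ _ hmono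
    simp only [hnf, List.isEmpty_nil, hne]
    simp [hnf] at hle ⊢
    omega
  · rcases List.exists_mem_of_ne_nil _ hnf with ⟨x, hx⟩
    have hx' := (PySem.Set.mem_diff _ _ _).mp hx
    have hxU : x ∈ pvU adj_graph := by
      rcases List.mem_flatMap.mp ((PySem.Set.mem_ofList _ _).mp hx'.1) with ⟨u, _, hxu⟩
      exact pvNbrs_subset_U adj_graph u x hxu
    have hlt : pvMu adj_graph
        (PySem.Set.union reachable
          (PySem.Set.diff (PySem.Set.ofList (frontier.flatMap (pvNbrs adj_graph))) reachable))
        < pvMu adj_graph reachable :=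
      pvMu_lt _ _ _ hmono x hxU hx'.2 ((PySem.Set.mem_union _ _ _).mpr (Or.inr hx))
    simp only [hne]
    split <;> omega

def has_path_to_p_block_alt (start_uid : String) (instances_dict : List (String × List (String × String))) (adj_graph : List (String × List String)) : Bool :=
  pvLoopB instances_dict adj_graph (PySem.Set.ofList [start_uid]) (PySem.Set.ofList [start_uid])

-- ===== PRECONDITION & SPEC =====
def Spec_has_path_to_p_block (start_uid : String) (instances_dict : List (String × List (String × String))) (adj_graph : List (String × List String)) (out : Bool) : Prop := out = has_path_to_p_block_alt start_uid instances_dict adj_graph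
instance (start_uid : String) (instances_dict : List (String × List (String × String))) (adj_graph : List (String × List String)) (out : Bool) : Decidable (Spec_has_path_to_p_block start_uid instances_dict adj_graph out) := by unfold Spec_has_path_to_p_block; infer_instance

-- ===== CLAIM (what is proved, stated in full; the proofs are below) =====
def Claim_equal_has_path_to_p_block : Prop := ∀ (start_uid : String) (instances_dict : List (String × List (String × String))) (adj_graph : List (String × List String)), Dom_has_path_to_p_block start_uid instances_dict adj_graph → Spec_has_path_to_p_block start_uid instances_dict adj_graph (has_path_to_p_block start_uid instances_dict adj_graph)

-- ===== LEMMAS AND PROOFS =====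

lemma pvCond_eq_pvPinB (instances_dict : List (String × List (String × String))) (c : String) :
    pvCond instances_dict c = pvPinB instances_dict c := by
  unfold pvCond pvPinB is_pin_block
  cases PySem.Dict.get? (PySem.Dict.mk instances_dict) c <;> rfl

-- reachability from a seed list of nodes along adj_graph edges
inductive pvReach (adj_graph : List (String × List String)) (Q : List String) : String → Prop
  | base {u : String} : u ∈ Q → pvReach adj_graph Q u
  | step {u v : String} : pvReach adj_graph Q u → v ∈ pvNbrs adj_graph u → pvReach adj_graph Q v

lemma pvReach_nil (adj_graph : List (String × List String)) (u : String) :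
    ¬ pvReach adj_graph [] u := by
  intro h
  induction h with
  | base hu => simp at hu
  | step _ _ ih => exact ih

lemma pvReach_mono (adj_graph : List (String × List String)) (Q Q' : List String)
    (hQ : ∀ x ∈ Q', pvReach adj_graph Q x) (u : String)
    (h : pvReach adj_graph Q' u) : pvReach adj_graph Q u := by
  induction h with
  | base hu => exact hQ _ hu
  | step _ hn ih => exact pvReach.step ih hn

-- frontier-advance lemma: anything reachable from the old seed Q is reachable from the new
-- seed Q' or is a fully-expanded node of V' \ Q'
lemma pvReach_transfer (adj_graph : List (String × List String))
    (Q Q' V' : List String)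
    (hQ : ∀ x ∈ Q, pvReach adj_graph Q' x ∨ (x ∈ V' ∧ x ∉ Q'))
    (hI : ∀ x ∈ V', x ∉ Q' → ∀ n ∈ pvNbrs adj_graph x, n ∈ V')
    (u : String) (h : pvReach adj_graph Q u) :
    pvReach adj_graph Q' u ∨ (u ∈ V' ∧ u ∉ Q') := by
  induction h with
  | base hu => exact hQ _ hu
  | @step a b ha hn ih =>
    rcases ih with hr | ⟨haV, haQ⟩
    · exact Or.inl (pvReach.step hr hn)
    · have hbV : b ∈ V' := hI a haV haQ b hn
      by_cases hbQ : b ∈ Q'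
      · exact Or.inl (pvReach.base hbQ)
      · exact Or.inr ⟨hbV, hbQ⟩

-- pvEnqueue bookkeeping
lemma pvEnqueue_mem_v (ns : List String) : ∀ (q : List String) (v : PySem.Set String)
    (x : String), x ∈ v → x ∈ (pvEnqueue ns q v).2 := by
  induction ns with
  | nil => intro q v x hx; simpa [pvEnqueue] using hx
  | cons n rest ih =>
    intro q v x hx
    rw [pvEnqueue_cons]
    by_cases hc : n ∈ v
    · rw [if_pos hc]; exact ih q v x hx
    · rw [if_neg hc]
      exact ih (q ++ [n]) (PySem.Set.add v n) x ((PySem.Set.mem_add _ _ _).mpr (Or.inl hx))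

lemma pvEnqueue_cover (ns : List String) : ∀ (q : List String) (v : PySem.Set String)
    (n : String), n ∈ ns → n ∈ (pvEnqueue ns q v).2 := by
  induction ns with
  | nil => intro q v n hn; simp at hn
  | cons m rest ih =>
    intro q v n hn
    rw [pvEnqueue_cons]
    by_cases hc : m ∈ v
    · rw [if_pos hc]
      rcases List.mem_cons.mp hn with rfl | hn'
      · exact pvEnqueue_mem_v rest q v n hc
      · exact ih q v n hn'
    · rw [if_neg hc]
      rcases List.mem_cons.mp hn with rfl | hn'
      · exact pvEnqueue_mem_v rest (q ++ [n]) (PySem.Set.add v n) n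
          ((PySem.Set.mem_add _ _ _).mpr (Or.inr rfl))
      · exact ih (q ++ [m]) (PySem.Set.add v m) n hn'

lemma pvEnqueue_q_sub (ns : List String) : ∀ (q : List String) (v : PySem.Set String)
    (x : String), x ∈ q → x ∈ (pvEnqueue ns q v).1 := by
  induction ns with
  | nil => intro q v x hx; simpa [pvEnqueue] using hx
  | cons n rest ih =>
    intro q v x hx
    rw [pvEnqueue_cons]
    by_cases hc : n ∈ v
    · rw [if_pos hc]; exact ih q v x hx
    · rw [if_neg hc]
      exact ih (q ++ [n]) (PySem.Set.add v n) x (by simp [hx])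

lemma pvEnqueue_q_mem (ns : List String) : ∀ (q : List String) (v : PySem.Set String)
    (x : String), x ∈ (pvEnqueue ns q v).1 → x ∈ q ∨ x ∈ ns := by
  induction ns with
  | nil => intro q v x hx; exact Or.inl (by simpa [pvEnqueue] using hx)
  | cons n rest ih =>
    intro q v x hx
    rw [pvEnqueue_cons] at hx
    by_cases hc : n ∈ v
    · rw [if_pos hc] at hx
      rcases ih q v x hx with h | h
      · exact Or.inl h
      · exact Or.inr (by simp [h])
    · rw [if_neg hc] at hx
      rcases ih (q ++ [n]) (PySem.Set.add v n) x hx with h | h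
      · rcases List.mem_append.mp h with h' | h'
        · exact Or.inl h'
        · simp at h'
          exact Or.inr (by simp [h'])
      · exact Or.inr (by simp [h])

lemma pvEnqueue_v_mem (ns : List String) : ∀ (q : List String) (v : PySem.Set String)
    (x : String), x ∈ (pvEnqueue ns q v).2 → x ∈ v ∨ x ∈ (pvEnqueue ns q v).1 := by
  induction ns with
  | nil => intro q v x hx; exact Or.inl (by simpa [pvEnqueue] using hx)
  | cons n rest ih =>
    intro q v x hx
    rw [pvEnqueue_cons] at hx ⊢
    by_cases hc : n ∈ v
    · rw [if_pos hc] at hx ⊢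
      exact ih q v x hx
    · rw [if_neg hc] at hx ⊢
      rcases ih (q ++ [n]) (PySem.Set.add v n) x hx with h | h
      · rcases (PySem.Set.mem_add _ _ _).mp h with h' | h'
        · exact Or.inl h'
        · subst h'
          exact Or.inr (pvEnqueue_q_sub rest (q ++ [x]) (PySem.Set.add v x) x (by simp))
      · exact Or.inr h

-- one BFS step preserves the invariant and the reachable-pin property
lemma pvBfs_iff_step (instances_dict : List (String × List (String × String)))
    (adj_graph : List (String × List String)) (c : String) (rest : List String)
    (v : PySem.Set String)
    (hqv : ∀ x ∈ c :: rest, x ∈ v)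
    (hI : ∀ x ∈ v, x ∉ c :: rest →
      pvPinB instances_dict x = false ∧ ∀ n ∈ pvNbrs adj_graph x, n ∈ v)
    (hpinc : pvPinB instances_dict c = false)
    (ih : (∀ x ∈ (pvEnqueue (pvNbrs adj_graph c) rest v).1,
            x ∈ (pvEnqueue (pvNbrs adj_graph c) rest v).2) →
          (∀ x ∈ (pvEnqueue (pvNbrs adj_graph c) rest v).2,
            x ∉ (pvEnqueue (pvNbrs adj_graph c) rest v).1 →
            pvPinB instances_dict x = false ∧
              ∀ n ∈ pvNbrs adj_graph x, n ∈ (pvEnqueue (pvNbrs adj_graph c) rest v).2) →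
          (pvBfs instances_dict adj_graph (pvEnqueue (pvNbrs adj_graph c) rest v).1
              (pvEnqueue (pvNbrs adj_graph c) rest v).2 = true ↔
            ∃ u, pvReach adj_graph (pvEnqueue (pvNbrs adj_graph c) rest v).1 u ∧
              pvPinB instances_dict u = true)) :
    (pvBfs instances_dict adj_graph (pvEnqueue (pvNbrs adj_graph c) rest v).1
        (pvEnqueue (pvNbrs adj_graph c) rest v).2 = true ↔
      ∃ u, pvReach adj_graph (c :: rest) u ∧ pvPinB instances_dict u = true) := by
  set q' := (pvEnqueue (pvNbrs adj_graph c) rest v).1 with hq'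
  set v' := (pvEnqueue (pvNbrs adj_graph c) rest v).2 with hv'
  have hqv' : ∀ x ∈ q', x ∈ v' := by
    intro x hx
    rcases pvEnqueue_q_mem (pvNbrs adj_graph c) rest v x hx with h | h
    · exact pvEnqueue_mem_v _ _ _ _ (hqv x (by simp [h]))
    · exact pvEnqueue_cover _ _ _ _ h
  have hI' : ∀ x ∈ v', x ∉ q' →
      pvPinB instances_dict x = false ∧ ∀ n ∈ pvNbrs adj_graph x, n ∈ v' := by
    intro x hxv' hxq'
    have hxv : x ∈ v := by
      rcases pvEnqueue_v_mem (pvNbrs adj_graph c) rest v x hxv' with h | h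
      · exact h
      · exact absurd h hxq'
    by_cases hxc : x = c
    · subst hxc
      exact ⟨hpinc, fun n hn => pvEnqueue_cover _ _ _ _ hn⟩
    · have hxrest : x ∉ rest := fun h => hxq' (pvEnqueue_q_sub _ _ _ _ h)
      have hxQ : x ∉ c :: rest := by simp [hxc, hxrest]
      rcases hI x hxv hxQ with ⟨hp, hnb⟩
      exact ⟨hp, fun n hn => pvEnqueue_mem_v _ _ _ _ (hnb n hn)⟩
  rw [ih hqv' hI']
  constructor
  · rintro ⟨u, hr, hp⟩
    refine ⟨u, pvReach_mono adj_graph (c :: rest) q' ?_ u hr, hp⟩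
    intro x hx
    rcases pvEnqueue_q_mem (pvNbrs adj_graph c) rest v x hx with h | h
    · exact pvReach.base (by simp [h])
    · exact pvReach.step (pvReach.base (by simp)) h
  · rintro ⟨u, hr, hp⟩
    have htr := pvReach_transfer adj_graph (c :: rest) q' v' ?_ (fun x hx hq => (hI' x hx hq).2)
      u hr
    · rcases htr with h | ⟨hv'', hq''⟩
      · exact ⟨u, h, hp⟩
      · exact absurd hp (by simp [(hI' u hv'' hq'').1])
    · intro x hx
      by_cases hxq' : x ∈ q'
      · exact Or.inl (pvReach.base hxq')
      · exact Or.inr ⟨pvEnqueue_mem_v _ _ _ _ (hqv x hx), hxq'⟩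

-- A's loop returns true iff a pin block is reachable from the queue
lemma pvBfs_iff (instances_dict : List (String × List (String × String)))
    (adj_graph : List (String × List String)) :
    ∀ (q : List String) (v : PySem.Set String),
    (∀ x ∈ q, x ∈ v) →
    (∀ x ∈ v, x ∉ q →
      pvPinB instances_dict x = false ∧ ∀ n ∈ pvNbrs adj_graph x, n ∈ v) →
    (pvBfs instances_dict adj_graph q v = true ↔
      ∃ u, pvReach adj_graph q u ∧ pvPinB instances_dict u = true) := by
  intro q v
  fun_induction pvBfs instances_dict adj_graph q v with
  | case1 v =>
    intro _ _
    simp only [Bool.false_eq_true, false_iff]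
    rintro ⟨u, hr, _⟩
    exact pvReach_nil adj_graph u hr
  | case2 v c rest hcond =>
    intro _ _
    refine ⟨fun _ => ?_, fun _ => rfl⟩
    exact ⟨c, pvReach.base (by simp), by rw [← pvCond_eq_pvPinB]; exact hcond⟩
  | case3 v c rest hcond ih =>
    intro hqv hI
    exact pvBfs_iff_step instances_dict adj_graph c rest v hqv hI
      (by rw [← pvCond_eq_pvPinB]; simpa using hcond) ih

-- B's loop returns true iff a pin block is reachable from the frontier
lemma pvLoopB_iff (instances_dict : List (String × List (String × String)))
    (adj_graph : List (String × List String)) :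
    ∀ (f r : PySem.Set String),
    (∀ x ∈ f, x ∈ r) →
    (∀ x ∈ r, x ∉ f →
      pvPinB instances_dict x = false ∧ ∀ n ∈ pvNbrs adj_graph x, n ∈ r) →
    (pvLoopB instances_dict adj_graph f r = true ↔
      ∃ u, pvReach adj_graph f u ∧ pvPinB instances_dict u = true) := by
  intro f r
  fun_induction pvLoopB instances_dict adj_graph f r with
  | case1 f r hemp =>
    intro _ _
    have hf : f = [] := List.isEmpty_iff.mp hemp
    subst hf
    simp only [Bool.false_eq_true, false_iff]
    rintro ⟨u, hr, _⟩
    exact pvReach_nil adj_graph u hr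
  | case2 f r hemp hany =>
    intro _ _
    refine ⟨fun _ => ?_, fun _ => rfl⟩
    rcases List.any_eq_true.mp hany with ⟨u, hu, hp⟩
    exact ⟨u, pvReach.base hu, hp⟩
  | case3 f r hemp hany ih =>
    intro hfr hI
    simp only [List.flatMap_subtype, List.unattach_attach] at ih ⊢
    have hnopin : ∀ x ∈ f, pvPinB instances_dict x = false := by
      intro x hx
      have := List.any_eq_false.mp (by simpa using hany) x hx
      simpa using this
    set newf := PySem.Set.diff (PySem.Set.ofList (f.flatMap (pvNbrs adj_graph))) r with hnewf
    set r' := PySem.Set.union r newf with hr'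
    have hfr' : ∀ x ∈ newf, x ∈ r' := fun x hx => (PySem.Set.mem_union _ _ _).mpr (Or.inr hx)
    have hI' : ∀ x ∈ r', x ∉ newf →
        pvPinB instances_dict x = false ∧ ∀ n ∈ pvNbrs adj_graph x, n ∈ r' := by
      intro x hxr' hxnf
      have hxr : x ∈ r := by
        rcases (PySem.Set.mem_union _ _ _).mp hxr' with h | h
        · exact h
        · exact absurd h hxnf
      by_cases hxf : x ∈ f
      · refine ⟨hnopin x hxf, ?_⟩
        intro n hn
        have hnof : n ∈ PySem.Set.ofList (f.flatMap (pvNbrs adj_graph)) :=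
          (PySem.Set.mem_ofList _ _).mpr (List.mem_flatMap.mpr ⟨x, hxf, hn⟩)
        by_cases hnr : n ∈ r
        · exact (PySem.Set.mem_union _ _ _).mpr (Or.inl hnr)
        · exact (PySem.Set.mem_union _ _ _).mpr (Or.inr ((PySem.Set.mem_diff _ _ _).mpr ⟨hnof, hnr⟩))
      · rcases hI x hxr hxf with ⟨hp, hnb⟩
        exact ⟨hp, fun n hn => (PySem.Set.mem_union _ _ _).mpr (Or.inl (hnb n hn))⟩
    rw [ih hfr' hI']
    constructor
    · rintro ⟨u, hr, hp⟩
      refine ⟨u, pvReach_mono adj_graph f newf ?_ u hr, hp⟩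
      intro x hx
      rcases List.mem_flatMap.mp ((PySem.Set.mem_ofList _ _).mp ((PySem.Set.mem_diff _ _ _).mp hx).1)
        with ⟨y, hy, hxy⟩
      exact pvReach.step (pvReach.base hy) hxy
    · rintro ⟨u, hr, hp⟩
      have htr := pvReach_transfer adj_graph f newf r' ?_
        (fun x hx hq => (hI' x hx hq).2) u hr
      · rcases htr with h | ⟨hv'', hq''⟩
        · exact ⟨u, h, hp⟩
        · exact absurd hp (by simp [(hI' u hv'' hq'').1])
      · intro x hx
        have hxr : x ∈ r := hfr x hx
        have hxnf : x ∉ newf := fun h => ((PySem.Set.mem_diff _ _ _).mp h).2 hxr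
        exact Or.inr ⟨(PySem.Set.mem_union _ _ _).mpr (Or.inl hxr), hxnf⟩

-- ===== VERDICT (by name: the statement is the Claim_ definition above) =====
theorem has_path_to_p_block_spec : Claim_equal_has_path_to_p_block := by
  intro start_uid instances_dict adj_graph _
  unfold Spec_has_path_to_p_block has_path_to_p_block has_path_to_p_block_alt
  have hofl : PySem.Set.ofList [start_uid] = [start_uid] := rfl
  rw [hofl]
  have hqv : ∀ x ∈ [start_uid], x ∈ ([start_uid] : List String) := fun x hx => hx
  have hI : ∀ x ∈ ([start_uid] : List String), x ∉ ([start_uid] : List String) →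
      pvPinB instances_dict x = false ∧
        ∀ n ∈ pvNbrs adj_graph x, n ∈ ([start_uid] : List String) := by
    intro x hx hx'; exact absurd hx hx'
  have hA := pvBfs_iff instances_dict adj_graph [start_uid] [start_uid] hqv hI
  have hB := pvLoopB_iff instances_dict adj_graph [start_uid] [start_uid] hqv hI
  have := hA.trans hB.symm
  cases hb : pvLoopB instances_dict adj_graph [start_uid] [start_uid]
  · cases ha : pvBfs instances_dict adj_graph [start_uid] [start_uid]
    · rfl
    · rw [hb] at this; rw [ha] at this; simpa using this.mp rfl
  · rw [hb] at this; exact this.mpr rfl
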